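-- pv_equiv track=rewrite | github.com/maximilianogz0/boxlab-engine | sketch_module.py | calculate_total_drawing_size
-- ===== SOURCE A (Python) =====
-- def calculate_total_drawing_size(rectangles, margin=0):
--     """
--     Calcula el tamaño total del dibujo basado en los rectángulos dibujados.
--
--     :param rectangles: Lista de rectángulos [(ancho, alto), ...].
--     :param margin: Margen adicional alrededor del dibujo en mm.
--     :return: (ancho_total, alto_total) en mm.
--     """
--     # Inicializar límites
--     total_width = 0
--     total_height = 0
--
--     # Asumiendo disposición en arreglo 2x3 o similar
--     row_width = 0
--     row_height = 0
--
--     for i, (width, height) in enumerate(rectangles):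
--         row_width += width + margin
--         row_height = max(row_height, height)
--
--         # Cada 3 rectángulos, pasa a la siguiente fila
--         if (i + 1) % 3 == 0 or i == len(rectangles) - 1:
--             total_width = max(total_width, row_width - margin)  # Remover último margen
--             total_height += row_height + margin
--             row_width = 0
--             row_height = 0
--
--     # Remover el margen adicional de la última fila
--     total_height -= margin
--
--     return total_width, total_height
-- ===== SOURCE B (Python) =====
-- def calculate_total_drawing_size(rectangles, margin=0):
--     chunks = [rectangles[i:i + 3] for i in range(0, len(rectangles), 3)]
--     row_widths = [sum(w for w, _ in c) + margin * (len(c) - 1) for c in chunks]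
--     row_heights = [max([0] + [h for _, h in c]) for c in chunks]
--     total_width = max([0] + row_widths)
--     total_height = sum(rh + margin for rh in row_heights) - margin
--     return total_width, total_height
-- ===== Notes on version B (the rewrite author's own statement) =====
-- stated objective: alternative
-- what changed: Replaces the single stateful loop (running row accumulators reset every 3rd index or at the end) by an explicit chunk-into-rows-of-3 decomposition with per-row closed-form width/height and a final max/sum.
import Mathlib
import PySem

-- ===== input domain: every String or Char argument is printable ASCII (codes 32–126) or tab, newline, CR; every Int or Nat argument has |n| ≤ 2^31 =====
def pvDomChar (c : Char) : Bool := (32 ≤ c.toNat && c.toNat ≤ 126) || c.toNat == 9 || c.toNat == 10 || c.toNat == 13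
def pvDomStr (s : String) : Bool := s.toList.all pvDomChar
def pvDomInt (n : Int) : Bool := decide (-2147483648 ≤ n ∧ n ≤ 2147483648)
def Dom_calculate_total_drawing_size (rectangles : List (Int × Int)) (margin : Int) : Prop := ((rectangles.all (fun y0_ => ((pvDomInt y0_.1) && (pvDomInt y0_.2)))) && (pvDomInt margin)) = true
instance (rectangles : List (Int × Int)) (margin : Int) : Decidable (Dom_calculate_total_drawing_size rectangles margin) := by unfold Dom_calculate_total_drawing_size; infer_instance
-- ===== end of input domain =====

-- B lays the rectangles out by explicit rows of 3 (chunk + per-row closed forms) instead of A's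
-- stateful loop; same values everywhere, proved below.

-- ===== PORT A =====
-- A's for-loop over enumerate(rectangles), carried as structural recursion over the list with the
-- running index i, the fixed length N, and the same four accumulators.
def pvLoopA (margin N : Int) : List (Int × Int) → Int → Int → Int → Int → Int → Int × Int
  | [], _, tw, th, _, _ => (tw, th)
  | (w, h) :: rest, i, tw, th, rw, rh =>
    let rw' := rw + w + margin
    let rh' := max rh h
    if (i + 1) % 3 = 0 ∨ i = N - 1 then
      pvLoopA margin N rest (i + 1) (max tw (rw' - margin)) (th + rh' + margin) 0 0
    else
      pvLoopA margin N rest (i + 1) tw th rw' rh'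

def calculate_total_drawing_size (rectangles : List (Int × Int)) (margin : Int) : Int × Int :=
  let (tw, th) := pvLoopA margin (rectangles.length : Int) rectangles 0 0 0 0 0
  (tw, th - margin)

-- ===== PORT B =====
-- rectangles[i:i+3] chunks, in order
def pvChunk3 : List (Int × Int) → List (List (Int × Int))
  | [] => []
  | a :: b :: c :: rest => [a, b, c] :: pvChunk3 rest
  | l => [l]

def calculate_total_drawing_size_alt (rectangles : List (Int × Int)) (margin : Int) : Int × Int :=
  let chunks := pvChunk3 rectangles
  let rowWidths := chunks.map (fun c => (c.map Prod.fst).sum + margin * ((c.length : Int) - 1))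
  let rowHeights := chunks.map (fun c => (c.map Prod.snd).foldl max 0)
  let totalWidth := rowWidths.foldl max 0
  let totalHeight := (rowHeights.map (fun rh => rh + margin)).sum - margin
  (totalWidth, totalHeight)

-- ===== PRECONDITION & SPEC =====
def Spec_calculate_total_drawing_size (rectangles : List (Int × Int)) (margin : Int) (out : Int × Int) : Prop := out = calculate_total_drawing_size_alt rectangles margin
instance (rectangles : List (Int × Int)) (margin : Int) (out : Int × Int) : Decidable (Spec_calculate_total_drawing_size rectangles margin out) := by unfold Spec_calculate_total_drawing_size; infer_instance

-- ===== CLAIM (what is proved, stated in full; the proofs are below) =====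
def Claim_equal_calculate_total_drawing_size : Prop := ∀ (rectangles : List (Int × Int)) (margin : Int), Dom_calculate_total_drawing_size rectangles margin → Spec_calculate_total_drawing_size rectangles margin (calculate_total_drawing_size rectangles margin)

-- ===== LEMMAS AND PROOFS =====

def pvRowW (margin : Int) (c : List (Int × Int)) : Int :=
  (c.map Prod.fst).sum + margin * ((c.length : Int) - 1)

def pvRowH (c : List (Int × Int)) : Int := (c.map Prod.snd).foldl max 0

lemma pvLoop_chunks (margin : Int) (l : List (Int × Int)) (i N tw th : Int)
    (hi : 0 ≤ i) (hmod : i % 3 = 0) (hN : N = i + l.length) :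
    pvLoopA margin N l i tw th 0 0 =
      ((pvChunk3 l).foldl (fun acc c => max acc (pvRowW margin c)) tw,
       th + ((pvChunk3 l).map (fun c => pvRowH c + margin)).sum) := by
  induction l using pvChunk3.induct generalizing i tw th N with
  | case1 => simp [pvLoopA, pvChunk3]
  | case2 a b c rest ih =>
    simp only [List.length_cons] at hN
    push_cast at hN
    have h1 : ¬ ((i + 1) % 3 = 0 ∨ i = N - 1) := by
      have : (0:Int) ≤ (rest.length : Int) := by positivity
      omega
    have h2 : ¬ ((i + 1 + 1) % 3 = 0 ∨ i + 1 = N - 1) := by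
      have : (0:Int) ≤ (rest.length : Int) := by positivity
      omega
    have h3 : ((i + 1 + 1 + 1) % 3 = 0 ∨ i + 1 + 1 = N - 1) := by
      left; omega
    rw [pvLoopA, if_neg h1, pvLoopA, if_neg h2, pvLoopA, if_pos h3]
    rw [ih (i + 1 + 1 + 1) N _ _ (by omega) (by omega) (by omega)]
    simp only [pvChunk3, List.foldl_cons, List.map_cons, List.sum_cons]
    refine Prod.ext ?_ ?_
    · simp only
      congr 2
      simp [pvRowW]
      ring
    · simp only
      simp [pvRowH, List.foldl]
      omega
  | case3 l hne h3 =>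
    rcases l with _ | ⟨a, _ | ⟨b, _ | ⟨c, rest⟩⟩⟩
    · exact absurd rfl hne
    · simp only [List.length_cons, List.length_nil] at hN
      push_cast at hN
      have hc : ((i + 1) % 3 = 0 ∨ i = N - 1) := by right; omega
      rw [pvLoopA, if_pos hc, pvLoopA]
      simp [pvChunk3, pvRowW, pvRowH]
      omega
    · simp only [List.length_cons, List.length_nil] at hN
      push_cast at hN
      have h1 : ¬ ((i + 1) % 3 = 0 ∨ i = N - 1) := by omega
      have hc : ((i + 1 + 1) % 3 = 0 ∨ i + 1 = N - 1) := by right; omega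
      rw [pvLoopA, if_neg h1, pvLoopA, if_pos hc, pvLoopA]
      simp [pvChunk3, pvRowW, pvRowH]
      constructor
      · ring_nf
      · omega
    · exact absurd rfl (h3 a b c rest)

theorem pv_main (rectangles : List (Int × Int)) (margin : Int) :
    calculate_total_drawing_size rectangles margin
      = calculate_total_drawing_size_alt rectangles margin := by
  unfold calculate_total_drawing_size calculate_total_drawing_size_alt
  rw [pvLoop_chunks margin rectangles 0 _ 0 0 le_rfl (by decide) (by simp)]
  simp only [zero_add]
  refine Prod.ext ?_ ?_
  · simp [List.foldl_map, pvRowW]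
  · simp only [pvRowH, PySem.List.sum_map_add_int, PySem.List.sum_map_const_int]
    simp [Function.comp_def]

-- ===== VERDICT (by name: the statement is the Claim_ definition above) =====
theorem calculate_total_drawing_size_spec : Claim_equal_calculate_total_drawing_size := by
  intro r m _; exact pv_main r m
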